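-- pv_equiv track=rewrite | github.com/lucaskmk/Python | Aulas-1semestre/Aula8_Dicionarios/Bingo.py | define_vencedores
-- ===== SOURCE A (Python) =====
-- def define_vencedores(ns, dps):
--     dt = {}
--     returnl = []
--     for nome, lnums in dps.items():
--         for num in lnums:
--             if num in ns:
--                 if nome not in dt:
--                     dt[nome] = 1
--                 else:
--                     dt[nome] += 1
--     maxnums = 0
--     for nome2, val in dt.items():
--         if val > maxnums:
--             maxnums = val
--     if maxnums == 0:
--         returnl = [x for x in dps.keys()]
--     else:
--         for nome2 , val in dt.items():
--             if val == maxnums: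
--                 returnl += [nome2]
--     return returnl
-- ===== SOURCE B (Python) =====
-- def define_vencedores(ns, dps):
--     best = 0
--     winners = []
--     for nome, lnums in dps.items():
--         c = sum(1 for num in lnums if num in ns)
--         if c > best:
--             best = c
--             winners = [nome]
--         elif c == best:
--             winners.append(nome)
--     return winners
-- ===== Notes on version B (the rewrite author's own statement) =====
-- stated objective: simpler
-- what changed: Replaces the build-count-dict-then-two-extra-scans structure with a single pass over dps.items() that keeps a running best count and the current winners list, needing no dictionary at all.
import Mathlib
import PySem

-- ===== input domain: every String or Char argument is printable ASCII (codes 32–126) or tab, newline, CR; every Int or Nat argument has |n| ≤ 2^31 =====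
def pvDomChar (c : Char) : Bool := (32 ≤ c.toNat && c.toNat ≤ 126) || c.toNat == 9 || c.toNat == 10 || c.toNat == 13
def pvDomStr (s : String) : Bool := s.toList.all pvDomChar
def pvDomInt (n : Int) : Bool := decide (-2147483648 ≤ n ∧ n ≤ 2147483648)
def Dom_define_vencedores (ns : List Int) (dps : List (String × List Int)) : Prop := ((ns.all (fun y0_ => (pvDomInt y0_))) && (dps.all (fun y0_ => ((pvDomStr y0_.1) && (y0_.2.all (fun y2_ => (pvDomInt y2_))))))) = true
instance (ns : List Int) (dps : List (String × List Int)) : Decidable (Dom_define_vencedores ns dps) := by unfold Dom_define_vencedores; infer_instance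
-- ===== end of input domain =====

-- B replaces A's count-dict + two extra scans with one pass keeping a running best count and winners list; same return value on dicts (association lists with distinct player names).


-- ===== PORT A =====
def define_vencedores (ns : List Int) (dps : List (String × List Int)) : List String :=
  let dt : PySem.Dict String Int :=
    dps.foldl (fun dt p =>
      p.2.foldl (fun dt num =>
        if ns.contains num then
          if dt.contains p.1 = false then dt.insert p.1 1
          else dt.insert p.1 (dt.getD p.1 0 + 1)
        else dt) dt) PySem.Dict.empty
  let maxnums : Int := dt.items.foldl (fun m q => if q.2 > m then q.2 else m) 0
  if maxnums = 0 then dps.map (fun p => p.1)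
  else dt.items.foldl (fun rl q => if q.2 = maxnums then rl ++ [q.1] else rl) []

-- ===== PORT B =====
def define_vencedores_alt (ns : List Int) (dps : List (String × List Int)) : List String :=
  (dps.foldl (fun (st : Int × List String) p =>
      let c : Int := (p.2.map (fun num => if ns.contains num then (1 : Int) else 0)).sum
      if c > st.1 then (c, [p.1])
      else if c = st.1 then (st.1, st.2 ++ [p.1])
      else st) ((0 : Int), ([] : List String))).2

-- ===== PRECONDITION & SPEC =====
-- Pre_ excludes association lists whose player names repeat: duplicate keys cannot occur in the Python dict dps, and on such lists A's merged per-name counts and B's per-entry scan legitimately differ.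
def Pre_define_vencedores (ns : List Int) (dps : List (String × List Int)) : Prop :=
  (dps.map Prod.fst).Nodup
instance (ns : List Int) (dps : List (String × List Int)) : Decidable (Pre_define_vencedores ns dps) := by unfold Pre_define_vencedores; infer_instance

def pvWitness_define_vencedores : List Int × (List (String × List Int)) :=
  ([1, 2], [("ana", [1, 3]), ("bob", [2, 1]), ("cid", [5])])

def Spec_define_vencedores (ns : List Int) (dps : List (String × List Int)) (out : List String) : Prop := out = define_vencedores_alt ns dps
instance (ns : List Int) (dps : List (String × List Int)) (out : List String) : Decidable (Spec_define_vencedores ns dps out) := by unfold Spec_define_vencedores; infer_instance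

-- ===== CLAIM (what is proved, stated in full; the proofs are below) =====
def Claim_equal_define_vencedores : Prop := ∀ (ns : List Int) (dps : List (String × List Int)), Dom_define_vencedores ns dps → Pre_define_vencedores ns dps → Spec_define_vencedores ns dps (define_vencedores ns dps)

-- ===== LEMMAS AND PROOFS =====

-- the matched-number count of a player, shared characterisation of both ports
def pvCnt (ns : List Int) (p : String × List Int) : Int :=
  ((p.2.countP (fun x => ns.contains x) : Nat) : Int)
def pvMax (ns : List Int) (dps : List (String × List Int)) (a : Int) : Int :=
  dps.foldl (fun m p => max m (pvCnt ns p)) a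

lemma pvMax_le_self (ns : List Int) (dps : List (String × List Int)) (a : Int) :
    a ≤ pvMax ns dps a := by
  induction dps generalizing a with
  | nil => simp [pvMax]
  | cons p t ih => exact le_trans (le_max_left _ _) (ih (max a (pvCnt ns p)))

lemma pvCnt_le_pvMax (ns : List Int) (dps : List (String × List Int)) (a : Int)
    (p : String × List Int) (hp : p ∈ dps) : pvCnt ns p ≤ pvMax ns dps a := by
  induction dps generalizing a with
  | nil => simp at hp
  | cons q t ih =>
    rcases List.mem_cons.1 hp with h | h
    · subst h; exact le_trans (le_max_right _ _) (pvMax_le_self ns t _)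
    · exact ih _ h

lemma pvCnt_nonneg (ns : List Int) (p : String × List Int) : 0 ≤ pvCnt ns p := by
  simp [pvCnt]

lemma inner_fold (ns : List Int) (nome : String) (l : List Int) :
    ∀ (dt : PySem.Dict String Int),
    l.foldl (fun dt num =>
        if ns.contains num then
          if dt.contains nome = false then dt.insert nome 1
          else dt.insert nome (dt.getD nome 0 + 1)
        else dt) dt
    = if (l.countP (fun x => ns.contains x)) = 0 then dt
      else if dt.contains nome then
        dt.insert nome (dt.getD nome 0 + ((l.countP (fun x => ns.contains x) : Nat) : Int))
      else dt.insert nome ((l.countP (fun x => ns.contains x) : Nat) : Int) := by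
  induction l with
  | nil => intro dt; simp
  | cons num t ih =>
    intro dt
    rw [List.foldl_cons]
    by_cases hn : ns.contains num
    · have hmem : num ∈ ns := by simpa using hn
      rw [if_pos hn]
      have hcount : (num :: t).countP (fun x => ns.contains x)
          = t.countP (fun x => ns.contains x) + 1 := by
        simp [hmem]
      rw [hcount]
      by_cases hc : dt.contains nome
      · rw [if_neg (by simp [hc]), ih]
        by_cases ht : t.countP (fun x => ns.contains x) = 0
        · rw [if_pos ht, if_neg (by omega), if_pos hc, ht]
          norm_num
        · rw [if_neg ht]
          simp only [PySem.Dict.contains_insert_self, PySem.Dict.getD_insert_self,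
            PySem.Dict.insert_insert_self, if_true]
          rw [if_neg (by omega), if_pos hc]
          congr 1; push_cast; ring
      · rw [if_pos (by simp [hc]), ih]
        by_cases ht : t.countP (fun x => ns.contains x) = 0
        · rw [if_pos ht, if_neg (by omega), if_neg hc, ht]
          norm_num
        · rw [if_neg ht]
          simp only [PySem.Dict.contains_insert_self, PySem.Dict.getD_insert_self,
            PySem.Dict.insert_insert_self, if_true]
          rw [if_neg (by omega), if_neg hc]
          congr 1; push_cast; ring
    · have hmem : num ∉ ns := by simpa using hn
      rw [if_neg hn, ih]
      have hcount : (num :: t).countP (fun x => ns.contains x)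
          = t.countP (fun x => ns.contains x) := by
        simp [hmem]
      rw [hcount]

lemma outer_fold (ns : List Int) : ∀ (dps : List (String × List Int)) (dt : PySem.Dict String Int),
    (dps.map Prod.fst).Nodup → (∀ p ∈ dps, dt.contains p.1 = false) →
    (dps.foldl (fun dt p =>
      p.2.foldl (fun dt num =>
        if ns.contains num then
          if dt.contains p.1 = false then dt.insert p.1 1
          else dt.insert p.1 (dt.getD p.1 0 + 1)
        else dt) dt) dt).items
    = dt.items ++ dps.filterMap (fun p => if pvCnt ns p = 0 then none else some (p.1, pvCnt ns p)) := by
  intro dps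
  induction dps with
  | nil => intro dt _ _; simp
  | cons p t ih =>
    intro dt hnd hfresh
    rw [List.foldl_cons, inner_fold]
    have hfp : dt.contains p.1 = false := hfresh p (List.mem_cons_self ..)
    have hnd' : (t.map Prod.fst).Nodup := (List.nodup_cons.1 hnd).2
    have hne : ∀ q ∈ t, q.1 ≠ p.1 := by
      intro q hq heq
      exact (List.nodup_cons.1 hnd).1 (heq ▸ List.mem_map_of_mem hq)
    by_cases hz : p.2.countP (fun x => ns.contains x) = 0
    · rw [if_pos hz, ih dt hnd' (fun q hq => hfresh q (List.mem_cons_of_mem _ hq))]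
      have : pvCnt ns p = 0 := by simp only [pvCnt, hz, Nat.cast_zero]
      simp [this]
    · rw [if_neg hz, if_neg (by simp [hfp])]
      rw [ih _ hnd' ?fresh]
      case fresh =>
        intro q hq
        rw [PySem.Dict.contains_insert]
        simp [hne q hq, hfresh q (List.mem_cons_of_mem _ hq)]
      rw [PySem.Dict.items_insert_of_not_contains dt _ hfp]
      have hnz : ¬ pvCnt ns p = 0 := by simpa [pvCnt, Nat.cast_eq_zero] using hz
      have hz' : ¬ ∀ a ∈ p.2, a ∉ ns := by simpa [List.countP_eq_zero] using hz
      simp [pvCnt, hz']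

lemma max_scan (ns : List Int) : ∀ (dps : List (String × List Int)) (a : Int), 0 ≤ a →
    (dps.filterMap (fun p => if pvCnt ns p = 0 then none else some (p.1, pvCnt ns p))).foldl
      (fun m q => if q.2 > m then q.2 else m) a = pvMax ns dps a := by
  intro dps
  induction dps with
  | nil => intro a _; simp [pvMax]
  | cons p t ih =>
    intro a ha
    by_cases hz : pvCnt ns p = 0
    · rw [List.filterMap_cons]
      simp only [hz, reduceIte]
      rw [ih a ha]
      simp [pvMax, hz, max_eq_left ha]
    · rw [List.filterMap_cons]
      simp only [hz, reduceIte, List.foldl_cons]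
      have h1 : (if pvCnt ns p > a then pvCnt ns p else a) = max a (pvCnt ns p) := by
        split_ifs with h <;> omega
      rw [h1, ih _ (le_trans ha (le_max_left _ _))]
      simp [pvMax]

lemma collect_eq (ns : List Int) (M : Int) (hM : M ≠ 0) : ∀ (dps : List (String × List Int)),
    ((dps.filterMap (fun p => if pvCnt ns p = 0 then none else some (p.1, pvCnt ns p))).filter
      (fun q => q.2 = M)).map Prod.fst
    = (dps.filter (fun p => pvCnt ns p = M)).map Prod.fst := by
  intro dps
  induction dps with
  | nil => simp
  | cons p t ih =>
    rw [List.filterMap_cons]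
    by_cases hz : pvCnt ns p = 0
    · have hne : ¬ (pvCnt ns p = M) := by rw [hz]; exact fun h => hM h.symm
      rw [if_pos hz, List.filter_cons_of_neg (by simpa using hne)]
      exact ih
    · rw [if_neg hz, List.filter_cons, List.filter_cons]
      by_cases he : pvCnt ns p = M
      · simp only [he, decide_true, if_true, List.map_cons]
        rw [ih]
      · simp only [he, decide_false, Bool.false_eq_true, if_false]
        exact ih

lemma alt_loop (ns : List Int) : ∀ (dps : List (String × List Int)) (best : Int) (ws : List String),
    dps.foldl (fun (st : Int × List String) p =>
      let c : Int := (p.2.map (fun num => if ns.contains num then (1 : Int) else 0)).sum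
      if c > st.1 then (c, [p.1])
      else if c = st.1 then (st.1, st.2 ++ [p.1])
      else st) (best, ws)
    = (pvMax ns dps best,
       if pvMax ns dps best = best
       then ws ++ (dps.filter (fun p => pvCnt ns p = pvMax ns dps best)).map Prod.fst
       else (dps.filter (fun p => pvCnt ns p = pvMax ns dps best)).map Prod.fst) := by
  intro dps
  induction dps with
  | nil => intro best ws; simp [pvMax]
  | cons p t ih =>
    intro best ws
    rw [List.foldl_cons]
    have hc : (p.2.map (fun num => if ns.contains num then (1 : Int) else 0)).sum = pvCnt ns p :=
      PySem.List.sum_map_ite_one_zero _ _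
    have hM : pvMax ns (p :: t) best = pvMax ns t (max best (pvCnt ns p)) := rfl
    simp only [hc]
    rcases lt_trichotomy best (pvCnt ns p) with hlt | heq | hgt
    · rw [if_pos hlt, ih, hM, max_eq_right hlt.le]
      have hne : pvMax ns t (pvCnt ns p) ≠ best := by
        have := pvMax_le_self ns t (pvCnt ns p); omega
      rw [if_neg hne, List.filter_cons]
      by_cases hp : pvMax ns t (pvCnt ns p) = pvCnt ns p
      · simp [hp]
      · have hp' : ¬ pvCnt ns p = pvMax ns t (pvCnt ns p) := fun h => hp h.symm
        simp [hp, hp']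
    · rw [if_neg (by omega), if_pos heq.symm, ih, hM, ← heq, max_self]
      rw [List.filter_cons]
      by_cases h : pvMax ns t best = best
      · simp [h, heq.symm]
      · have h' : ¬ best = pvMax ns t best := fun e => h e.symm
        simp [h, h', heq.symm]
    · rw [if_neg (by omega), if_neg (by omega), ih, hM, max_eq_left hgt.le]
      rw [List.filter_cons]
      have hp : ¬ pvCnt ns p = pvMax ns t best := by
        have := pvMax_le_self ns t best; omega
      simp [hp]

lemma alt_eq (ns : List Int) (dps : List (String × List Int)) :
    define_vencedores_alt ns dps
    = (dps.filter (fun p => pvCnt ns p = pvMax ns dps 0)).map Prod.fst := by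
  unfold define_vencedores_alt
  rw [alt_loop]
  split_ifs with h <;> simp

lemma a_eq (ns : List Int) (dps : List (String × List Int)) (h : (dps.map Prod.fst).Nodup) :
    define_vencedores ns dps
    = (dps.filter (fun p => pvCnt ns p = pvMax ns dps 0)).map Prod.fst := by
  simp only [define_vencedores]
  rw [outer_fold ns dps PySem.Dict.empty h (fun p _ => PySem.Dict.contains_empty ..)]
  have hemp : (PySem.Dict.empty : PySem.Dict String Int).items = [] := rfl
  rw [hemp, List.nil_append, max_scan ns dps 0 le_rfl]
  by_cases hz : pvMax ns dps 0 = 0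
  · rw [if_pos hz]
    have hall : ∀ p ∈ dps, pvCnt ns p = pvMax ns dps 0 := by
      intro p hp
      have h1 := pvCnt_le_pvMax ns dps 0 p hp
      have h2 := pvCnt_nonneg ns p
      omega
    rw [List.filter_eq_self.2 (fun p hp => by simpa using hall p hp)]
  · rw [if_neg hz]
    have hfa := PySem.List.foldl_append_if
      (fun q : String × Int => decide (q.2 = pvMax ns dps 0)) (fun q => q.1)
      (dps.filterMap (fun p => if pvCnt ns p = 0 then none else some (p.1, pvCnt ns p))) []
    simp only [decide_eq_true_eq] at hfa
    rw [hfa, List.nil_append]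
    simpa using collect_eq ns (pvMax ns dps 0) hz dps

-- ===== VERDICT (by name: the statement is the Claim_ definition above) =====
theorem define_vencedores_spec : Claim_equal_define_vencedores := by
  intro ns dps _ hpre
  unfold Spec_define_vencedores
  rw [a_eq ns dps hpre, alt_eq]
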